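-- pv_equiv track=rewrite | github.com/tafiranium/PDF-Booklet | web/scripts/PDFcreator.py | calculate_booklet_order
-- ===== SOURCE A (Python) =====
-- from math import ceil
--
-- def calculate_booklet_order(total_pages: int, rotate_all: bool, rotate: bool = False,
--                             flip_horizontal: bool = False, flip_vertical: bool = False):
--     # Создает последовательность страниц для буклета
--     if total_pages <= 0:
--         return []
--
--     num_rows = ceil(total_pages / 4)
--
--     # Создаем матрицу 4xnum_rows (4 колонки, num_rows строк)
--     matrix = [[None, None, None, None] for _ in range(num_rows)]
--
--     # Заполняем матрицу
--     current_page = 1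
--
--     # 1. Заполняем четные позиции (0 и 2) по возрастанию
--     for i in range(num_rows):
--         for j in range(4):
--             if current_page > total_pages:
--                 break
--             if j % 2 == 0:
--                 matrix[i][j] = current_page
--                 current_page += 1
--         if current_page > total_pages:
--             break
--
--
--     for i in range(num_rows - 1, -1, -1):
--         for j in range(3, -1, -1):
--             if current_page > total_pages:
--                 break
--             if j % 2 != 0:
--                 matrix[i][j] = current_page
--                 current_page += 1
--         if current_page > total_pages:
--             break
--
--
--     flat_list = []
--
--     for row in range(num_rows):
--         for col in range(4):
--             flat_list.append(matrix[row][col])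
--
--     lst = [flat_list[i:i + 2] for i in range(0, len(flat_list), 2)]
--
--
--
--     # Функция swap исправлена - работает с индексами
--     if rotate_all:
--         for i in range(len(lst)):
--             temp = lst[i][0]
--             lst[i][0] = lst[i][1]
--             lst[i][1] = temp
--
--     if rotate:
--         for i in range(1, len(lst), 2):
--             temp = lst[i][0]
--             lst[i][0] = lst[i][1]
--             lst[i][1] = temp
--
--     flat_list = []
--     for row in range(len(lst)):
--         for col in range(2):
--             flat_list.append(lst[row][col])
--     result_pairs = []
--     for i in range(0, len(flat_list) - 1, 2):
--         if i + 1 < len(flat_list):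
--             if flat_list[i] is not None and flat_list[i + 1] is not None:
--                 result_pairs.append((flat_list[i], flat_list[i + 1]))
--             elif flat_list[i] is not None:
--                 result_pairs.append((flat_list[i], None))
--             elif flat_list[i + 1] is not None:
--                 result_pairs.append((None, flat_list[i + 1]))
--         elif flat_list[i] is not None:
--             result_pairs.append((flat_list[i], None))
--     return result_pairs
-- ===== SOURCE B (Python) =====
-- def calculate_booklet_order(total_pages: int, rotate_all: bool, rotate: bool = False,
--                             flip_horizontal: bool = False, flip_vertical: bool = False):
--     # Closed-form single pass: sheet height N = 4*ceil(total/4); pair idx is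
--     # (idx+1, N-idx) with out-of-range pages as None, swapped per the flags.
--     if total_pages <= 0:
--         return []
--     n4 = (total_pages + 3) // 4 * 4
--
--     def pair(idx):
--         a = idx + 1 if idx + 1 <= total_pages else None
--         b = n4 - idx if n4 - idx <= total_pages else None
--         if rotate_all:
--             a, b = b, a
--         if rotate and idx % 2 == 1:
--             a, b = b, a
--         return (a, b)
--
--     return [p for p in map(pair, range(n4 // 2)) if p != (None, None)]
-- ===== Notes on version B (the rewrite author's own statement) =====
-- stated objective: simpler
-- what changed: Replaces A's 4xN matrix construction (two directional fill passes with breaks, flatten, chunking into pairs, in-place swap passes, re-flatten and a pairing loop) by a closed-form single pass that computes each booklet pair (idx+1, 4*ceil(n/4)-idx) directly and applies the rotation swaps per index.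
import Mathlib
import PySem

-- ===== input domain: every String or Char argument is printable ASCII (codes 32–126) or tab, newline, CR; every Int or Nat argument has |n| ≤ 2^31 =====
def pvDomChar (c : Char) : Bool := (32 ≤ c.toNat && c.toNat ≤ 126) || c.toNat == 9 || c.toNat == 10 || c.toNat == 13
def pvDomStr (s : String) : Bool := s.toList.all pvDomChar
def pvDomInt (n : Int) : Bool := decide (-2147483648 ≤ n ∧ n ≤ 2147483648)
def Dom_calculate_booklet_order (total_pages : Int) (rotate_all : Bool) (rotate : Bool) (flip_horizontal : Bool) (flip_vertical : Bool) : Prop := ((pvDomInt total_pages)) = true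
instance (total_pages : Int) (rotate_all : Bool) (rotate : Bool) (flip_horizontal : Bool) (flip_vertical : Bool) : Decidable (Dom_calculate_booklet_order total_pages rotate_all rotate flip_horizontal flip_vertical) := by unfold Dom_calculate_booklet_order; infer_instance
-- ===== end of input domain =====

-- B replaces A's matrix-building multi-pass by a closed-form single pass over the pair
-- indices (objective: simpler); same return value on every input.

-- ===== PORT A =====
-- matrix row [None, None, None, None]
def pvRow0 : List (Option Int) := [none, none, none, none]

-- first fill loop, inner 'for j in range(4)' with its break; assigns at even j
def pvFill1Row : List Nat → List (Option Int) → Int → Int → List (Option Int) × Int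
  | [], row, page, _ => (row, page)
  | j :: js, row, page, total =>
    if page > total then (row, page)
    else if j % 2 == 0 then pvFill1Row js (row.set j (some page)) (page + 1) total
    else pvFill1Row js row page total

-- first fill loop over the rows, with its break after a row
def pvFill1 : List (List (Option Int)) → Int → Int → List (List (Option Int)) × Int
  | [], page, _ => ([], page)
  | r :: rs, page, total =>
    let q := pvFill1Row [0, 1, 2, 3] r page total
    if q.2 > total then (q.1 :: rs, q.2)
    else
      let q' := pvFill1 rs q.2 total
      (q.1 :: q'.1, q'.2)

-- second fill loop, inner 'for j in range(3,-1,-1)' with its break; assigns at odd j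
def pvFill2Row : List Nat → List (Option Int) → Int → Int → List (Option Int) × Int
  | [], row, page, _ => (row, page)
  | j :: js, row, page, total =>
    if page > total then (row, page)
    else if j % 2 != 0 then pvFill2Row js (row.set j (some page)) (page + 1) total
    else pvFill2Row js row page total

-- second fill loop: rows visited from the last to the first (we walk the reversed list)
def pvFill2 : List (List (Option Int)) → Int → Int → List (List (Option Int)) × Int
  | [], page, _ => ([], page)
  | r :: rs, page, total =>
    let q := pvFill2Row [3, 2, 1, 0] r page total
    if q.2 > total then (q.1 :: rs, q.2)
    else
      let q' := pvFill2 rs q.2 total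
      (q.1 :: q'.1, q'.2)

-- lst = [flat[i:i+2] for i in range(0, len(flat), 2)]
def pvChunk2 : List (Option Int) → List (List (Option Int))
  | [] => []
  | [x] => [[x]]
  | x :: y :: rest => [x, y] :: pvChunk2 rest

-- the in-place swap of lst[i][0] and lst[i][1] (rows always have length 2)
def pvSwap2 : List (Option Int) → List (Option Int)
  | [a, b] => [b, a]
  | l => l

-- 'for i in range(1, len(lst), 2): swap' — walk with the index, swap at the odd ones
def pvRotOdd : Nat → List (List (Option Int)) → List (List (Option Int))
  | _, [] => []
  | i, x :: xs => (if i % 2 == 1 then pvSwap2 x else x) :: pvRotOdd (i + 1) xs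

-- final loop building result_pairs two flat entries at a time
def pvPairsOut : List (Option Int) → List (Option Int × Option Int)
  | [] => []
  | [_] => []
  | a :: b :: rest =>
    (match a, b with
     | some x, some y => [(some x, some y)]
     | some x, none => [(some x, none)]
     | none, some y => [(none, some y)]
     | none, none => []) ++ pvPairsOut rest

def calculate_booklet_order (total_pages : Int) (rotate_all : Bool) (rotate : Bool) (flip_horizontal : Bool) (flip_vertical : Bool) : List (Option Int × Option Int) :=
  if total_pages ≤ 0 then []
  else
    -- math.ceil(total_pages / 4) : exact on Dom as (total_pages + 3) // 4
    let num_rows : Int := PySem.Int.floordiv (total_pages + 3) 4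
    let matrix := List.replicate num_rows.toNat pvRow0
    let q1 := pvFill1 matrix 1 total_pages
    let q2 := pvFill2 q1.1.reverse q1.2 total_pages
    let matrix2 := q2.1.reverse
    let flat := matrix2.flatten            -- row-major append loop
    let lst0 := pvChunk2 flat
    let lst1 := if rotate_all then lst0.map pvSwap2 else lst0
    let lst2 := if rotate then pvRotOdd 0 lst1 else lst1
    pvPairsOut lst2.flatten                -- second flatten loop + result_pairs loop

-- ===== PORT B =====
def pvPairB (total_pages n4 : Int) (rotate_all rotate : Bool) (idx : Int) : Option Int × Option Int :=
  let a := if idx + 1 ≤ total_pages then some (idx + 1) else none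
  let b := if n4 - idx ≤ total_pages then some (n4 - idx) else none
  let q := if rotate_all then (b, a) else (a, b)
  let q' := if rotate && (PySem.Int.mod idx 2 == 1) then (q.2, q.1) else q
  q'

def calculate_booklet_order_alt (total_pages : Int) (rotate_all : Bool) (rotate : Bool) (flip_horizontal : Bool) (flip_vertical : Bool) : List (Option Int × Option Int) :=
  if total_pages ≤ 0 then []
  else
    let n4 : Int := PySem.Int.floordiv (total_pages + 3) 4 * 4
    ((PySem.List.pyRange 0 (PySem.Int.floordiv n4 2) 1).map
        (pvPairB total_pages n4 rotate_all rotate)).filter (fun p => p != (none, none))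

-- ===== PRECONDITION & SPEC =====
def Spec_calculate_booklet_order (total_pages : Int) (rotate_all : Bool) (rotate : Bool) (flip_horizontal : Bool) (flip_vertical : Bool) (out : List (Option Int × Option Int)) : Prop := out = calculate_booklet_order_alt total_pages rotate_all rotate flip_horizontal flip_vertical
instance (total_pages : Int) (rotate_all : Bool) (rotate : Bool) (flip_horizontal : Bool) (flip_vertical : Bool) (out : List (Option Int × Option Int)) : Decidable (Spec_calculate_booklet_order total_pages rotate_all rotate flip_horizontal flip_vertical out) := by unfold Spec_calculate_booklet_order; infer_instance

-- ===== CLAIM (what is proved, stated in full; the proofs are below) =====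
def Claim_equal_calculate_booklet_order : Prop := ∀ (total_pages : Int) (rotate_all : Bool) (rotate : Bool) (flip_horizontal : Bool) (flip_vertical : Bool), Dom_calculate_booklet_order total_pages rotate_all rotate flip_horizontal flip_vertical → Spec_calculate_booklet_order total_pages rotate_all rotate flip_horizontal flip_vertical (calculate_booklet_order total_pages rotate_all rotate flip_horizontal flip_vertical)

-- ===== LEMMAS AND PROOFS =====

-- page value: some q if page q exists, none otherwise
def pv (n q : Int) : Option Int := if q ≤ n then some q else none

theorem fill1Row_closed (p n : Int) :
    pvFill1Row [0, 1, 2, 3] pvRow0 p n =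
      ([pv n p, none, pv n (p + 1), none],
       if p > n then p else if p + 1 > n then p + 1 else p + 2) := by
  simp only [pvFill1Row, pvRow0, pv, List.set]
  split_ifs <;> simp_all <;> omega

theorem map_row_none (k : Nat) (p n : Int) (h : n < p) :
    (List.range k).map (fun i : Nat => [pv n (p + 2 * i), none, pv n (p + 2 * i + 1), none]) = List.replicate k pvRow0 := by
  rw [List.eq_replicate_iff]
  refine ⟨by simp, ?_⟩
  intro b hb
  simp only [List.mem_map, List.mem_range] at hb
  obtain ⟨i, -, rfl⟩ := hb
  have h0 : (0:Int) ≤ (i:Int) := by positivity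
  simp only [pv, pvRow0]
  rw [if_neg (by omega), if_neg (by omega)]

theorem fill1_closed (k : Nat) (p n : Int) :
    pvFill1 (List.replicate k pvRow0) p n =
      ((List.range k).map (fun i : Nat => [pv n (p + 2 * i), none, pv n (p + 2 * i + 1), none]),
       if p > n then p else min (p + 2 * k) (n + 1)) := by
  induction k generalizing p with
  | zero => simp only [List.replicate, pvFill1, List.range_zero, List.map_nil]
            refine Prod.ext rfl ?_
            simp only
            split_ifs <;> omega
  | succ k ih =>
    rw [List.replicate_succ]
    simp only [pvFill1, fill1Row_closed]
    by_cases h1 : n < p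
    · rw [if_pos (by simpa using (by omega : (if p > n then p else if p + 1 > n then p + 1 else p + 2) > n))]
      refine Prod.ext ?_ ?_
      · simp only [List.range_succ_eq_map, List.map_cons, List.map_map]
        refine List.cons_eq_cons.mpr ⟨by norm_num, ?_⟩
        rw [show ((fun i : Nat => [pv n (p + 2 * i), none, pv n (p + 2 * i + 1), none]) ∘ Nat.succ)
                = (fun i : Nat => [pv n ((p+2) + 2 * i), none, pv n ((p+2) + 2 * i + 1), none]) from ?_,
              map_row_none k (p+2) n (by omega)]
        funext i; simp only [Function.comp]; push_cast; ring_nf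
      · simp only; split_ifs <;> omega
    · by_cases h2 : n < p + 1
      · rw [if_pos (by split_ifs <;> omega)]
        refine Prod.ext ?_ ?_
        · simp only [List.range_succ_eq_map, List.map_cons, List.map_map]
          refine List.cons_eq_cons.mpr ⟨by norm_num, ?_⟩
          rw [show ((fun i : Nat => [pv n (p + 2 * i), none, pv n (p + 2 * i + 1), none]) ∘ Nat.succ)
                = (fun i : Nat => [pv n ((p+2) + 2 * i), none, pv n ((p+2) + 2 * i + 1), none]) from ?_,
              map_row_none k (p+2) n (by omega)]
          funext i; simp only [Function.comp]; push_cast; ring_nf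
        · simp only; split_ifs <;> omega
      · by_cases h3 : n < p + 2
        · rw [if_pos (by split_ifs <;> omega)]
          refine Prod.ext ?_ ?_
          · simp only [List.range_succ_eq_map, List.map_cons, List.map_map]
            refine List.cons_eq_cons.mpr ⟨by norm_num, ?_⟩
            rw [show ((fun i : Nat => [pv n (p + 2 * i), none, pv n (p + 2 * i + 1), none]) ∘ Nat.succ)
                  = (fun i : Nat => [pv n ((p+2) + 2 * i), none, pv n ((p+2) + 2 * i + 1), none]) from ?_,
                map_row_none k (p+2) n (by omega)]
            funext i; simp only [Function.comp]; push_cast; ring_nf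
          · simp only; split_ifs <;> omega
        · rw [if_neg (by split_ifs <;> omega)]
          rw [show (if p > n then p else if p + 1 > n then p + 1 else p + 2) = p + 2 by split_ifs <;> omega]
          rw [ih (p+2)]
          refine Prod.ext ?_ ?_
          · simp only [List.range_succ_eq_map, List.map_cons, List.map_map]
            refine List.cons_eq_cons.mpr ⟨by norm_num, ?_⟩
            refine List.map_congr_left ?_
            intro i _; simp only [Function.comp]; push_cast; ring_nf
          · simp only; split_ifs <;> omega

theorem fill2Row_closed (x y : Option Int) (p n : Int) :
    pvFill2Row [3, 2, 1, 0] [x, none, y, none] p n =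
      ([x, pv n (p + 1), y, pv n p],
       if p > n then p else if p + 1 > n then p + 1 else p + 2) := by
  simp only [pvFill2Row, pv, List.set]
  split_ifs <;> simp_all <;> omega

theorem map_row2_untouched (k : Nat) (p n c : Int) (h : n < p) :
    (List.range k).map (fun t : Nat => [pv n (c - 2 * t), pv n (p + 2 * t + 1), pv n (c - 2 * t + 1), pv n (p + 2 * t)])
      = (List.range k).map (fun t : Nat => [pv n (c - 2 * t), none, pv n (c - 2 * t + 1), none]) := by
  refine List.map_congr_left ?_
  intro t _
  have h0 : (0:Int) ≤ (t:Int) := by positivity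
  have e1 : pv n (p + 2 * (t:Int) + 1) = none := by simp only [pv]; rw [if_neg (by omega)]
  have e2 : pv n (p + 2 * (t:Int)) = none := by simp only [pv]; rw [if_neg (by omega)]
  rw [e1, e2]

theorem fill2_closed (k : Nat) (p n c : Int) :
    pvFill2 ((List.range k).map (fun t : Nat => [pv n (c - 2 * t), none, pv n (c - 2 * t + 1), none])) p n =
      ((List.range k).map
         (fun t : Nat => [pv n (c - 2 * t), pv n (p + 2 * t + 1), pv n (c - 2 * t + 1), pv n (p + 2 * t)]),
       if p > n then p else min (p + 2 * k) (n + 1)) := by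
  induction k generalizing p c with
  | zero => simp only [List.range_zero, List.map_nil, pvFill2]
            refine Prod.ext rfl ?_
            simp only
            split_ifs <;> omega
  | succ k ih =>
    have hshift : ((fun t : Nat => [pv n (c - 2 * t), none, pv n (c - 2 * t + 1), none]) ∘ Nat.succ)
        = (fun t : Nat => [pv n ((c-2) - 2 * t), none, pv n ((c-2) - 2 * t + 1), none]) := by
      funext t; simp only [Function.comp]; push_cast; ring_nf
    rw [List.range_succ_eq_map, List.map_cons, List.map_map, hshift]
    simp only [pvFill2, Nat.cast_zero, mul_zero, sub_zero, fill2Row_closed]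
    by_cases h1 : n < p
    · rw [if_pos (by split_ifs <;> omega)]
      refine Prod.ext ?_ ?_
      · simp only [List.map_cons, List.map_map]
        refine List.cons_eq_cons.mpr ⟨by norm_num, ?_⟩
        rw [show ((fun t : Nat => [pv n (c - 2 * t), pv n (p + 2 * t + 1), pv n (c - 2 * t + 1), pv n (p + 2 * t)]) ∘ Nat.succ)
              = (fun t : Nat => [pv n ((c-2) - 2 * t), pv n ((p+2) + 2 * t + 1), pv n ((c-2) - 2 * t + 1), pv n ((p+2) + 2 * t)]) from ?_,
            map_row2_untouched k (p+2) n (c-2) (by omega)]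
        funext t; simp only [Function.comp]; push_cast; ring_nf
      · simp only; split_ifs <;> omega
    · by_cases h2 : n < p + 1
      · rw [if_pos (by split_ifs <;> omega)]
        refine Prod.ext ?_ ?_
        · simp only [List.map_cons, List.map_map]
          refine List.cons_eq_cons.mpr ⟨by norm_num, ?_⟩
          rw [show ((fun t : Nat => [pv n (c - 2 * t), pv n (p + 2 * t + 1), pv n (c - 2 * t + 1), pv n (p + 2 * t)]) ∘ Nat.succ)
                = (fun t : Nat => [pv n ((c-2) - 2 * t), pv n ((p+2) + 2 * t + 1), pv n ((c-2) - 2 * t + 1), pv n ((p+2) + 2 * t)]) from ?_,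
              map_row2_untouched k (p+2) n (c-2) (by omega)]
          funext t; simp only [Function.comp]; push_cast; ring_nf
        · simp only; split_ifs <;> omega
      · by_cases h3 : n < p + 2
        · rw [if_pos (by split_ifs <;> omega)]
          refine Prod.ext ?_ ?_
          · simp only [List.map_cons, List.map_map]
            refine List.cons_eq_cons.mpr ⟨by norm_num, ?_⟩
            rw [show ((fun t : Nat => [pv n (c - 2 * t), pv n (p + 2 * t + 1), pv n (c - 2 * t + 1), pv n (p + 2 * t)]) ∘ Nat.succ)
                  = (fun t : Nat => [pv n ((c-2) - 2 * t), pv n ((p+2) + 2 * t + 1), pv n ((c-2) - 2 * t + 1), pv n ((p+2) + 2 * t)]) from ?_,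
                map_row2_untouched k (p+2) n (c-2) (by omega)]
            funext t; simp only [Function.comp]; push_cast; ring_nf
          · simp only; split_ifs <;> omega
        · rw [if_neg (by split_ifs <;> omega)]
          rw [show (if p > n then p else if p + 1 > n then p + 1 else p + 2) = p + 2 by split_ifs <;> omega]
          rw [ih (p+2) (c-2)]
          refine Prod.ext ?_ ?_
          · simp only [List.map_cons, List.map_map]
            refine List.cons_eq_cons.mpr ⟨by norm_num, ?_⟩
            refine List.map_congr_left ?_
            intro t _; simp only [Function.comp]; push_cast; ring_nf
          · simp only; split_ifs <;> omega

theorem reverse_map_range {α : Type} (f : Nat → α) (k : Nat) :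
    ((List.range k).map f).reverse = (List.range k).map (fun t => f (k - 1 - t)) := by
  apply List.ext_getElem (by simp)
  intro i h1 h2
  simp only [List.getElem_reverse, List.getElem_map, List.getElem_range, List.length_map,
    List.length_range]

theorem chunk2_flatten (l : List Nat) (a b c d : Nat → Option Int) :
    pvChunk2 ((l.map (fun i => [a i, b i, c i, d i])).flatten)
      = (l.map (fun i => [[a i, b i], [c i, d i]])).flatten := by
  induction l with
  | nil => rfl
  | cons j rest ih => simp only [List.map_cons, List.flatten_cons, List.cons_append,
      List.nil_append, pvChunk2, ih]

theorem flatten_pairs (k : Nat) (g : Nat → List (Option Int)) :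
    ((List.range k).map (fun i => [g (2 * i), g (2 * i + 1)])).flatten
      = (List.range (2 * k)).map g := by
  induction k with
  | zero => rfl
  | succ k ih =>
    rw [show 2 * (k + 1) = 2 * k + 1 + 1 by ring, List.range_succ, List.range_succ,
      List.range_succ, List.map_append, List.map_append, List.map_append, List.flatten_append, ih]
    simp

theorem rotOdd_map (m : Nat) (c : Nat) (g : Nat → List (Option Int)) :
    pvRotOdd c ((List.range m).map g)
      = (List.range m).map (fun i => if (c + i) % 2 == 1 then pvSwap2 (g i) else g i) := by
  induction m generalizing c g with
  | zero => rfl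
  | succ m ih =>
    rw [List.range_succ_eq_map, List.map_cons, List.map_map, List.map_cons, List.map_map]
    simp only [pvRotOdd, ih (c + 1)]
    refine List.cons_eq_cons.mpr ⟨by norm_num, ?_⟩
    refine List.map_congr_left ?_
    intro i _
    simp only [Function.comp]
    rw [show c + 1 + i = c + (i + 1) by omega]

theorem pairsOut_flatten (l : List Nat) (x y : Nat → Option Int) :
    pvPairsOut ((l.map (fun j => [x j, y j])).flatten) =
      (l.map (fun j => (x j, y j))).filter (fun p => p != (none, none)) := by
  induction l with
  | nil => rfl
  | cons j rest ih =>
    simp only [List.map_cons, List.flatten_cons, List.cons_append, List.nil_append,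
      List.filter_cons]
    cases hx : x j <;> cases hy : y j <;> simp [pvPairsOut, ih]

theorem main_eq (n : Int) (ra r fh fv : Bool) :
    calculate_booklet_order n ra r fh fv = calculate_booklet_order_alt n ra r fh fv := by
  by_cases hn : n ≤ 0
  · simp [calculate_booklet_order, calculate_booklet_order_alt, hn]
  · rw [not_le] at hn
    have hfd : PySem.Int.floordiv (n + 3) 4 = (n + 3) / 4 :=
      PySem.Int.floordiv_eq_ediv_of_pos (by omega)
    have hknn : (0:Int) ≤ (n + 3) / 4 := Int.ediv_nonneg (by omega) (by omega)
    set k : Nat := ((n + 3) / 4).toNat with hk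
    have hkc : ((k : Nat) : Int) = (n + 3) / 4 := Int.toNat_of_nonneg hknn
    have hbound : 4 * (k:Int) - 3 ≤ n ∧ n ≤ 4 * (k:Int) := by rw [hkc]; omega
    -- ---- A side ----
    rw [calculate_booklet_order, if_neg (by omega)]
    simp only [hfd, ← hk]
    rw [fill1_closed k 1 n]
    simp only
    rw [show (if (1:Int) > n then (1:Int) else min (1 + 2 * (k:Int)) (n + 1)) = min (1 + 2 * (k:Int)) (n + 1) from if_neg (by omega)]
    -- reversed matrix in the form fill2_closed expects
    have hrev : ((List.range k).map (fun i : Nat => [pv n (1 + 2 * i), none, pv n (1 + 2 * i + 1), none])).reverse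
        = (List.range k).map (fun t : Nat => [pv n (2 * (k:Int) - 1 - 2 * t), none, pv n (2 * (k:Int) - 1 - 2 * t + 1), none]) := by
      rw [reverse_map_range]
      refine List.map_congr_left ?_
      intro t ht
      rw [List.mem_range] at ht
      have hc : ((k - 1 - t : Nat) : Int) = (k:Int) - 1 - t := by omega
      simp only [hc]
      rw [show 1 + 2 * ((k:Int) - 1 - (t:Int)) = 2 * (k:Int) - 1 - 2 * t by ring]
    rw [hrev, fill2_closed k _ n (2 * (k:Int) - 1)]
    simp only
    -- the final matrix rows
    have hmat : ((List.range k).map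
          (fun t : Nat => [pv n (2 * (k:Int) - 1 - 2 * t), pv n (min (1 + 2 * (k:Int)) (n + 1) + 2 * t + 1),
            pv n (2 * (k:Int) - 1 - 2 * t + 1), pv n (min (1 + 2 * (k:Int)) (n + 1) + 2 * t)])).reverse
        = (List.range k).map (fun i : Nat => [pv n (2 * (i:Int) + 1), pv n (4 * (k:Int) - 2 * i),
            pv n (2 * (i:Int) + 2), pv n (4 * (k:Int) - 2 * i - 1)]) := by
      rw [reverse_map_range]
      refine List.map_congr_left ?_
      intro i hi
      rw [List.mem_range] at hi
      have hc : ((k - 1 - i : Nat) : Int) = (k:Int) - 1 - i := by omega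
      simp only [hc]
      have hik : (i:Int) ≤ (k:Int) - 1 := by omega
      refine List.cons_eq_cons.mpr ⟨congrArg _ (by ring), ?_⟩
      refine List.cons_eq_cons.mpr ⟨?_, ?_⟩
      · by_cases hcase : 2 * (k:Int) ≤ n
        · rw [min_eq_left (by omega)]
          exact congrArg _ (by ring)
        · rw [min_eq_right (by omega)]
          simp only [pv]
          rw [if_neg (by omega), if_neg (by omega)]
      refine List.cons_eq_cons.mpr ⟨congrArg _ (by ring), ?_⟩
      refine List.cons_eq_cons.mpr ⟨?_, rfl⟩
      by_cases hcase : 2 * (k:Int) ≤ n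
      · rw [min_eq_left (by omega)]
        exact congrArg _ (by ring)
      · rw [min_eq_right (by omega)]
        simp only [pv]
        rw [if_neg (by omega), if_neg (by omega)]
    rw [hmat]
    rw [chunk2_flatten (List.range k) (fun i => pv n (2 * (i:Int) + 1)) (fun i => pv n (4 * (k:Int) - 2 * i))
          (fun i => pv n (2 * (i:Int) + 2)) (fun i => pv n (4 * (k:Int) - 2 * i - 1))]
    have hpairs : (List.range k).map (fun i : Nat => [[pv n (2 * (i:Int) + 1), pv n (4 * (k:Int) - 2 * i)],
          [pv n (2 * (i:Int) + 2), pv n (4 * (k:Int) - 2 * i - 1)]])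
        = (List.range k).map (fun i : Nat =>
            [(fun j : Nat => [pv n ((j:Int) + 1), pv n (4 * (k:Int) - j)]) (2 * i),
             (fun j : Nat => [pv n ((j:Int) + 1), pv n (4 * (k:Int) - j)]) (2 * i + 1)]) := by
      refine List.map_congr_left ?_
      intro i _
      simp only
      push_cast
      refine List.cons_eq_cons.mpr ⟨?_, ?_⟩
      · refine List.cons_eq_cons.mpr ⟨congrArg _ (by ring), List.cons_eq_cons.mpr ⟨congrArg _ (by ring), rfl⟩⟩
      · refine List.cons_eq_cons.mpr ⟨List.cons_eq_cons.mpr ⟨congrArg _ (by ring), List.cons_eq_cons.mpr ⟨congrArg _ (by ring), rfl⟩⟩, rfl⟩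
    rw [hpairs, flatten_pairs k (fun j : Nat => [pv n ((j:Int) + 1), pv n (4 * (k:Int) - j)])]
    -- ---- B side ----
    rw [calculate_booklet_order_alt, if_neg (show ¬(n ≤ 0) by omega)]
    simp only [hfd, ← hkc]
    rw [show ((k:Int)) * 4 = 4 * (k:Int) from mul_comm _ _]
    have hdiv2 : PySem.Int.floordiv (4 * (k:Int)) 2 = (((2 * k : Nat)) : Int) := by
      rw [PySem.Int.floordiv_eq_ediv_of_pos (by omega)]
      push_cast
      omega
    rw [hdiv2, PySem.List.pyRange_one 0 ((2 * k : Nat) : Int)]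
    simp only [sub_zero, Int.toNat_natCast, List.map_map, zero_add]
    -- pointwise: each pair of A equals pvPairB of B
    have hfilter : ∀ (f g : Nat → Option Int × Option Int), (∀ j, j ∈ List.range (2*k) → f j = g j) →
        ((List.range (2*k)).map f).filter (fun p => p != (none, none))
          = ((List.range (2*k)).map g).filter (fun p => p != (none, none)) := by
      intro f g h
      rw [List.map_congr_left h]
    have hmod : ∀ j : Nat, PySem.Int.mod (j:Int) 2 = ((j % 2 : Nat) : Int) := by
      intro j
      rw [PySem.Int.mod_eq_emod_of_pos (by omega)]
      push_cast
      omega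
    have hsw2 : (pvSwap2 ∘ fun j : Nat => [pv n ((j:Int) + 1), pv n (4 * (k:Int) - j)])
        = fun j : Nat => [pv n (4 * (k:Int) - j), pv n ((j:Int) + 1)] := by
      funext j
      simp [Function.comp, pvSwap2]
    -- case split on the flags
    rcases ra <;> rcases r
    · -- ra = false, r = false
      simp only [Bool.false_eq_true, if_false]
      rw [pairsOut_flatten]
      refine hfilter _ _ ?_
      intro j _
      simp only [Function.comp, pvPairB, pv, Bool.false_and, Bool.false_eq_true, if_false]
    · -- ra = false, r = true
      simp only [Bool.false_eq_true, if_false, reduceIte]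
      rw [rotOdd_map]
      have hsw : ∀ j : Nat, (if (0 + j) % 2 == 1 then pvSwap2 [pv n ((j:Int) + 1), pv n (4 * (k:Int) - j)]
            else [pv n ((j:Int) + 1), pv n (4 * (k:Int) - j)])
          = [if j % 2 == 1 then pv n (4 * (k:Int) - j) else pv n ((j:Int) + 1),
             if j % 2 == 1 then pv n ((j:Int) + 1) else pv n (4 * (k:Int) - j)] := by
        intro j
        rw [Nat.zero_add]
        by_cases hj : j % 2 = 1 <;> simp [hj, pvSwap2]
      simp only [hsw]
      rw [pairsOut_flatten]
      refine hfilter _ _ ?_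
      intro j _
      simp only [Function.comp, pvPairB, pv, Bool.true_and]
      rw [hmod j]
      by_cases hj : j % 2 = 1
      · rw [hj]; norm_num
      · have hj0 : j % 2 = 0 := by omega
        rw [hj0]; norm_num
    · -- ra = true, r = false
      simp only [reduceIte, Bool.false_eq_true, if_false]
      rw [hsw2, pairsOut_flatten]
      refine hfilter _ _ ?_
      intro j _
      simp only [Function.comp, pvPairB, pv, Bool.false_and, Bool.false_eq_true, if_false, reduceIte]
    · -- ra = true, r = true
      simp only [reduceIte]
      rw [hsw2, rotOdd_map]
      have hsw : ∀ j : Nat, (if (0 + j) % 2 == 1 then pvSwap2 [pv n (4 * (k:Int) - j), pv n ((j:Int) + 1)]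
            else [pv n (4 * (k:Int) - j), pv n ((j:Int) + 1)])
          = [if j % 2 == 1 then pv n ((j:Int) + 1) else pv n (4 * (k:Int) - j),
             if j % 2 == 1 then pv n (4 * (k:Int) - j) else pv n ((j:Int) + 1)] := by
        intro j
        rw [Nat.zero_add]
        by_cases hj : j % 2 = 1 <;> simp [hj, pvSwap2]
      simp only [hsw]
      rw [pairsOut_flatten]
      refine hfilter _ _ ?_
      intro j _
      simp only [Function.comp, pvPairB, pv, Bool.true_and, reduceIte]
      rw [hmod j]
      by_cases hj : j % 2 = 1
      · rw [hj]; norm_num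
      · have hj0 : j % 2 = 0 := by omega
        rw [hj0]; norm_num

-- ===== VERDICT (by name: the statement is the Claim_ definition above) =====
theorem calculate_booklet_order_spec : Claim_equal_calculate_booklet_order := by
  intro n ra r fh fv _
  unfold Spec_calculate_booklet_order
  exact main_eq n ra r fh fv
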